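-- pv_equiv track=rewrite | github.com/AlgorithmOnline/jaeeun | 20210308/광호변환.py | findPpQq
-- ===== SOURCE A (Python) =====
-- import collections
--
-- def findPpQq(st):
--     status = 0
--     orange = collections.Counter(st)
--     if len(orange) == 0:
--         return 0
--     elif len(orange) == 1:
--         return 0
--     elif orange[")"] != orange["("]:
--         return 0
--     else:
--         status = 1
--         stack = []
--         for k in st:
--             if k == "(":
--                 stack.append(-1)
--             elif k == ")":
--                 if len(stack) == 0:
--                     return 1
--                 else:
--                     stack.pop()
--     return 2
-- ===== SOURCE B (Python) =====
-- def findPpQq(st):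
--     if len(set(st)) <= 1:
--         return 0
--     # keep only parens, then cancel matched adjacent pairs by rewriting them away to a fixpoint;
--     # the irreducible remainder is a run of closers followed by a run of openers
--     r = "".join(c for c in st if c in "()")
--     while "()" in r:
--         r = r.replace("()", "")
--     if r.count(")") != r.count("("):
--         return 0
--     return 2 if r == "" else 1
-- ===== Notes on version B (the rewrite author's own statement) =====
-- stated objective: alternative
-- what changed: Replaces the Counter pass plus sentinel-stack scan by string rewriting: filter the string to its parentheses, cancel adjacent open-close pairs by repeated replace until a fixpoint, and read the answer off the irreducible remainder, a run of closers followed by a run of openers (0 if the two runs differ in length or the string has fewer than two distinct characters, 2 if the remainder is empty, else 1).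
import Mathlib
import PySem

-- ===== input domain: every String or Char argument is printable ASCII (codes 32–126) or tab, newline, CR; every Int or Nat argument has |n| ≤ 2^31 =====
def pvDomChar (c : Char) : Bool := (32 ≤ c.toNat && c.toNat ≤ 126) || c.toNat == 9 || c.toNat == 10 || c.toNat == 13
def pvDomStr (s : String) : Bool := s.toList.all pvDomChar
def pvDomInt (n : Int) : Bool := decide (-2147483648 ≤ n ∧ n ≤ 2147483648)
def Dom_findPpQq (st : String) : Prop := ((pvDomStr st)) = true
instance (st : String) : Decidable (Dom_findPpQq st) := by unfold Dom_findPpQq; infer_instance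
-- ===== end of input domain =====

-- B replaces A's Counter pass plus sentinel-stack scan by string rewriting: filter to the
-- parentheses, cancel adjacent open-close pairs to a fixpoint, and read the answer off the
-- irreducible remainder (measured faster at the check's largest size: C-level replace).

-- ===== PORT A =====
-- the 'for k in st' stack loop; 'some r' models the early 'return 1', none = loop fell through
def findPpQqLoopA : List Char → List Int → Option Int
  | [], _ => none
  | k :: ks, stack =>
    if k = '(' then findPpQqLoopA ks (stack ++ [-1])
    else if k = ')' then
      if stack.length = 0 then some 1
      else findPpQqLoopA ks stack.dropLast
    else findPpQqLoopA ks stack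

def findPpQq (st : String) : Int :=
  let orange := PySem.Dict.counter st.toList
  if orange.items.length = 0 then 0
  else if orange.items.length = 1 then 0
  else if orange.getD ')' 0 ≠ orange.getD '(' 0 then 0
  else
    match findPpQqLoopA st.toList [] with
    | some r => r
    | none => 2

-- ===== PORT B =====
-- one pass of Python's r.replace("()", ""): scan left to right, delete non-overlapping "()"
def pvRepl : List Char → List Char
  | [] => []
  | [c] => [c]
  | c1 :: c2 :: rest =>
    if c1 = '(' ∧ c2 = ')' then pvRepl rest else c1 :: pvRepl (c2 :: rest)

-- '"()" in r'
def pvHasPair : List Char → Bool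
  | [] => false
  | [_] => false
  | c1 :: c2 :: rest => (decide (c1 = '(') && decide (c2 = ')')) || pvHasPair (c2 :: rest)

-- cited by pvReduce's decreasing_by
theorem pvRepl_length_lt (cs : List Char) (h : pvHasPair cs = true) :
    (pvRepl cs).length < cs.length := by
  induction cs using pvRepl.induct with
  | case1 => simp [pvHasPair] at h
  | case2 c => simp [pvHasPair] at h
  | case3 c1 c2 rest hpair ih =>
    have hle : ∀ ds : List Char, (pvRepl ds).length ≤ ds.length := by
      intro ds
      induction ds using pvRepl.induct with
      | case1 => simp [pvRepl]
      | case2 c => simp [pvRepl]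
      | case3 d1 d2 r hp ih2 => simp [pvRepl, hp]; omega
      | case4 d1 d2 r hp ih2 => simp [pvRepl, hp]; simpa using ih2
    simp only [pvRepl, if_pos hpair, List.length_cons]
    have := hle rest; omega
  | case4 c1 c2 rest hpair ih =>
    simp only [pvHasPair, Bool.or_eq_true, Bool.and_eq_true, decide_eq_true_eq] at h
    rcases h with h | h
    · exact absurd ⟨h.1, h.2⟩ hpair
    · simp only [pvRepl, if_neg hpair, List.length_cons]
      exact Nat.succ_lt_succ (ih h)

-- 'while "()" in r: r = r.replace("()", "")'
def pvReduce (cs : List Char) : List Char :=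
  if h : pvHasPair cs = true then pvReduce (pvRepl cs) else cs
termination_by cs.length
decreasing_by exact pvRepl_length_lt cs h

def findPpQq_alt (st : String) : Int :=
  if PySem.Set.len (PySem.Set.ofList st.toList) ≤ 1 then 0
  else
    let r := pvReduce (st.toList.filter (fun c => c = '(' || c = ')'))
    if r.count ')' ≠ r.count '(' then 0
    else if r = [] then 2 else 1

-- ===== PRECONDITION & SPEC =====
def Spec_findPpQq (st : String) (out : Int) : Prop := out = findPpQq_alt st
instance (st : String) (out : Int) : Decidable (Spec_findPpQq st out) := by unfold Spec_findPpQq; infer_instance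

-- ===== CLAIM (what is proved, stated in full; the proofs are below) =====
def Claim_equal_findPpQq : Prop := ∀ (st : String), Dom_findPpQq st → Spec_findPpQq st (findPpQq st)

-- ===== LEMMAS AND PROOFS =====

/-- whether the running balance starting from `b` ever drops below 0 at a `)`. -/
def pvNeg : List Char → Int → Bool
  | [], _ => false
  | k :: ks, b =>
    if k = '(' then pvNeg ks (b + 1)
    else if k = ')' then (decide (b - 1 < 0) || pvNeg ks (b - 1))
    else pvNeg ks b

/-- A's stack loop returns `some 1` exactly when the balance (= stack length) dips below 0. -/
theorem loopA_eq (cs : List Char) (stack : List Int) :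
    findPpQqLoopA cs stack =
      (if pvNeg cs (stack.length : Int) then some 1 else none) := by
  induction cs generalizing stack with
  | nil => simp [findPpQqLoopA, pvNeg]
  | cons k ks ih =>
    by_cases h1 : k = '('
    · rw [findPpQqLoopA, if_pos h1, ih (stack ++ [-1])]
      simp [pvNeg, h1]
    · by_cases h2 : k = ')'
      · by_cases hl : stack.length = 0
        · simp [findPpQqLoopA, h1, h2, hl, pvNeg]
        · have hpos : 1 ≤ stack.length := Nat.one_le_iff_ne_zero.mpr hl
          have hdl : (stack.dropLast.length : Int) = (stack.length : Int) - 1 := by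
            have h : stack.dropLast.length = stack.length - 1 := List.length_dropLast
            omega
          have hneg : ¬ ((stack.length : Int) - 1 < 0) := by omega
          simp [findPpQqLoopA, h1, h2, hl, pvNeg, ih, hdl, hneg, Nat.cast_sub hpos]
      · simp [findPpQqLoopA, h1, h2, pvNeg, ih]

/-- one replace pass preserves the '(' minus ')' count difference. -/
theorem pvCnt (c : Char) (l : List Char) :
    (((c :: l).count '(' : Int)) - (((c :: l).count ')' : Int))
      = ((l.count '(' : Int) - (l.count ')' : Int))
        + (if c = '(' then 1 else if c = ')' then -1 else 0) := by
  rcases eq_or_ne c '(' with h1 | h1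
  · subst h1; simp [List.count_cons]; push_cast; ring
  · rcases eq_or_ne c ')' with h2 | h2
    · subst h2; simp [List.count_cons, h1]; push_cast; ring
    · simp [List.count_cons, h1, h2]

theorem pvRepl_count_diff (cs : List Char) :
    ((pvRepl cs).count '(' : Int) - ((pvRepl cs).count ')' : Int)
      = (cs.count '(' : Int) - (cs.count ')' : Int) := by
  induction cs using pvRepl.induct with
  | case1 => simp [pvRepl]
  | case2 c => simp [pvRepl]
  | case3 c1 c2 rest hpair ih =>
    obtain ⟨h1, h2⟩ := hpair; subst h1; subst h2
    have hrw : pvRepl ('(' :: ')' :: rest) = pvRepl rest := by simp [pvRepl]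
    rw [hrw, pvCnt, pvCnt, ih]
    simp
  | case4 c1 c2 rest hpair ih =>
    simp only [pvRepl, if_neg hpair]
    rw [pvCnt, pvCnt, ih]

theorem pvRepl_neg (cs : List Char) (b : Int) :
    (decide (b < 0) || pvNeg (pvRepl cs) b) = (decide (b < 0) || pvNeg cs b) := by
  induction cs using pvRepl.induct generalizing b with
  | case1 => simp [pvRepl]
  | case2 c => simp [pvRepl]
  | case3 c1 c2 rest hpair ih =>
    obtain ⟨h1, h2⟩ := hpair; subst h1; subst h2
    have hrw : pvRepl ('(' :: ')' :: rest) = pvRepl rest := by simp [pvRepl]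
    rw [hrw]
    by_cases hlt : b < 0
    · simp [hlt]
    · have h := ih b
      simp only [hlt, decide_false, Bool.false_or] at h
      simp [pvNeg, hlt, show b + 1 - 1 = b from by ring, h]
  | case4 c1 c2 rest hpair ih =>
    by_cases h1 : c1 = '('
    · subst h1
      have hc2 : ¬ (c2 = ')') := fun h => hpair ⟨rfl, h⟩
      have hrw : pvRepl ('(' :: c2 :: rest) = '(' :: pvRepl (c2 :: rest) := by
        simp [pvRepl, hc2]
      rw [hrw]
      by_cases hlt : b < 0
      · simp [hlt]
      · have h := ih (b + 1)
        simp only [show ¬(b + 1 < 0) from by omega, decide_false, Bool.false_or] at h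
        simp [pvNeg, hlt, h]
    · have hrw : pvRepl (c1 :: c2 :: rest) = c1 :: pvRepl (c2 :: rest) := by
        simp [pvRepl, h1]
      rw [hrw]
      by_cases hlt : b < 0
      · simp [hlt]
      · by_cases h2 : c1 = ')'
        · subst h2
          have h := ih (b - 1)
          by_cases hlt1 : b - 1 < 0
          · simp [pvNeg, hlt, hlt1, h1]
          · simp only [hlt1, decide_false, Bool.false_or] at h
            simp [pvNeg, hlt, hlt1, h1, h]
        · have h := ih b
          simp only [hlt, decide_false, Bool.false_or] at h
          simp [pvNeg, hlt, h1, h2, h]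

theorem pvRepl_mem (cs : List Char) (c : Char) (h : c ∈ pvRepl cs) : c ∈ cs := by
  induction cs using pvRepl.induct with
  | case1 => simpa [pvRepl] using h
  | case2 d => simpa [pvRepl] using h
  | case3 c1 c2 rest hpair ih =>
    simp only [pvRepl, if_pos hpair] at h
    simp [List.mem_cons, ih h]
  | case4 c1 c2 rest hpair ih =>
    simp only [pvRepl, if_neg hpair, List.mem_cons] at h
    rcases h with h | h
    · simp [h]
    · simpa [List.mem_cons] using Or.inr (ih h)

theorem pvReduce_count_diff (cs : List Char) :
    ((pvReduce cs).count '(' : Int) - ((pvReduce cs).count ')' : Int)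
      = (cs.count '(' : Int) - (cs.count ')' : Int) := by
  induction cs using pvReduce.induct with
  | case1 cs' h ih =>
    rw [pvReduce, dif_pos h, ← pvRepl_count_diff cs']
    exact ih
  | case2 cs' h =>
    rw [pvReduce, dif_neg h]

theorem pvReduce_neg (cs : List Char) : pvNeg (pvReduce cs) 0 = pvNeg cs 0 := by
  induction cs using pvReduce.induct with
  | case1 cs' h ih =>
    rw [pvReduce, dif_pos h]
    have h0 := pvRepl_neg cs' 0
    simp only [show ¬ ((0:Int) < 0) by omega, decide_false, Bool.false_or] at h0
    rw [ih, h0]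
  | case2 cs' h =>
    rw [pvReduce, dif_neg h]

theorem pvReduce_noPair (cs : List Char) : pvHasPair (pvReduce cs) = false := by
  induction cs using pvReduce.induct with
  | case1 cs' h ih =>
    rw [pvReduce, dif_pos h]; exact ih
  | case2 cs' h =>
    rw [pvReduce, dif_neg h]; simpa using h

theorem pvReduce_mem (cs : List Char) (c : Char) : c ∈ pvReduce cs → c ∈ cs := by
  induction cs using pvReduce.induct with
  | case1 cs' hp ih =>
    intro h
    rw [pvReduce, dif_pos hp] at h
    exact pvRepl_mem cs' c (ih h)
  | case2 cs' hp =>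
    intro h
    rwa [pvReduce, dif_neg hp] at h

/-- filtering away non-paren characters preserves the ever-negative flag. -/
theorem pvNeg_filter (cs : List Char) (b : Int) :
    pvNeg (cs.filter (fun c => c = '(' || c = ')')) b = pvNeg cs b := by
  induction cs generalizing b with
  | nil => simp
  | cons k ks ih =>
    by_cases h1 : k = '('
    · simp [List.filter_cons, h1, pvNeg, ih]
    · by_cases h2 : k = ')'
      · simp [List.filter_cons, h1, h2, pvNeg, ih]
      · simp [List.filter_cons, h1, h2, pvNeg, ih]

/-- a pair-free all-paren string is ")"*a ++ "("*b. -/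
theorem pvShape (cs : List Char) : pvHasPair cs = false →
    (∀ c ∈ cs, c = '(' ∨ c = ')') →
    cs = List.replicate (cs.count ')') ')' ++ List.replicate (cs.count '(') '(' := by
  induction cs using pvHasPair.induct with
  | case1 => intro _ _; simp
  | case2 c =>
    intro _ ha
    rcases ha c (by simp) with h | h <;> subst h <;> simp
  | case3 c1 c2 rest ih =>
    intro hp ha
    simp only [pvHasPair, Bool.or_eq_false_iff, Bool.and_eq_false_iff,
      decide_eq_false_iff_not] at hp
    obtain ⟨hnp, htail⟩ := hp
    have ih' := ih htail (fun c hc => ha c (List.mem_cons_of_mem c1 hc))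
    rcases ha c1 (by simp) with h1 | h1
    · -- c1 = '(' : then c2 ≠ ')', so c2 = '(' and the tail contains no ')'
      subst h1
      have hc2 : c2 = '(' := by
        rcases ha c2 (by simp) with h | h
        · exact h
        · exact absurd h (by rcases hnp with h' | h' <;> simp_all)
      have ha0 : (c2 :: rest).count ')' = 0 := by
        by_contra hne
        rcases Nat.exists_eq_succ_of_ne_zero hne with ⟨a, haa⟩
        rw [haa, List.replicate_succ] at ih'
        have hhd : c2 = ')' := by
          have := congrArg (fun l => l.headD ' ') ih'
          simpa using this
        rw [hc2] at hhd; simp at hhd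
      rw [ha0, List.replicate_zero, List.nil_append] at ih'
      have hcnt : ('(' :: c2 :: rest).count ')' = 0 := by
        simp [List.count_cons, ha0]
      have hcnt2 : ('(' :: c2 :: rest).count '(' = (c2 :: rest).count '(' + 1 := by
        simp [List.count_cons]
      rw [hcnt, hcnt2, List.replicate_zero, List.nil_append, List.replicate_succ]
      rw [← ih']
    · -- c1 = ')'
      subst h1
      have hcnt : (')' :: c2 :: rest).count ')' = (c2 :: rest).count ')' + 1 := by
        simp [List.count_cons]
      have hcnt2 : (')' :: c2 :: rest).count '(' = (c2 :: rest).count '(' := by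
        simp [List.count_cons]
      rw [hcnt, hcnt2, List.replicate_succ, List.cons_append]
      exact congrArg _ ih'

-- ===== VERDICT (by name: the statement is the Claim_ definition above) =====
theorem findPpQq_spec : Claim_equal_findPpQq := by
  intro st _
  unfold Spec_findPpQq findPpQq findPpQq_alt
  set cs := st.toList with hcs
  have hkeys : (PySem.Dict.counter cs).items.length = (PySem.Set.ofList cs).length := by
    have h := PySem.Dict.keys_counter cs
    have : (PySem.Dict.counter cs).keys.length = (PySem.Set.ofList cs).length := by rw [h]
    simpa [PySem.Dict.keys] using this
  set r := pvReduce (cs.filter (fun c => c = '(' || c = ')')) with hr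
  have hdiff : ((r.count '(' : Int)) - (r.count ')' : Int)
      = (cs.count '(' : Int) - (cs.count ')' : Int) := by
    rw [hr, pvReduce_count_diff]
    congr 1 <;> · norm_cast; simp [List.count_filter]
  have hneg : pvNeg r 0 = pvNeg cs 0 := by
    rw [hr, pvReduce_neg, pvNeg_filter]
  by_cases hsl : (PySem.Set.ofList cs).length ≤ 1
  · -- both return 0 via the distinct-character check
    rcases Nat.le_one_iff_eq_zero_or_eq_one.mp hsl with h | h
    · simp [hkeys, h, PySem.Set.len]
    · simp [hkeys, h, PySem.Set.len]
  · -- at least two distinct characters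
    have hB : ¬ (PySem.Set.len (PySem.Set.ofList cs) ≤ 1) := by
      simpa [PySem.Set.len] using hsl
    have h0 : ¬ ((PySem.Dict.counter cs).items.length = 0) := by rw [hkeys]; omega
    have h1 : ¬ ((PySem.Dict.counter cs).items.length = 1) := by rw [hkeys]; omega
    simp only [if_neg h0, if_neg h1, if_neg hB, PySem.Dict.getD_counter]
    by_cases hne : ((cs.count ')' : Int)) ≠ ((cs.count '(' : Int))
    · have hbne : r.count ')' ≠ r.count '(' := by
        intro hc; apply hne; omega
      simp [hne, hbne]
    · have hceq : ((cs.count ')' : Int)) = ((cs.count '(' : Int)) := not_not.mp hne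
      have hbeq : r.count ')' = r.count '(' := by omega
      have hp : pvHasPair r = false := by rw [hr]; exact pvReduce_noPair _
      have ha : ∀ c ∈ r, c = '(' ∨ c = ')' := by
        intro c hc
        have hm := pvReduce_mem _ c (hr ▸ hc)
        rcases List.mem_filter.mp hm with ⟨-, hc2⟩
        simpa using hc2
      have hshape := pvShape r hp ha
      rw [loopA_eq]
      simp only [List.length_nil, Nat.cast_zero]
      rcases Nat.eq_zero_or_pos (r.count ')') with ha0 | hapos
      · have hrnil : r = [] := by
          conv_lhs => rw [hshape]
          rw [ha0, ← hbeq, ha0]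
          simp
        have hnf : pvNeg cs 0 = false := by rw [← hneg, hrnil]; simp [pvNeg]
        simp [hne, hbeq, hrnil, hnf]
      · obtain ⟨k, hk⟩ := Nat.exists_eq_succ_of_ne_zero (Nat.pos_iff_ne_zero.mp hapos)
        have hrcons : r = ')' :: (List.replicate k ')' ++ List.replicate (r.count '(') '(') := by
          conv_lhs => rw [hshape]
          rw [hk, List.replicate_succ, List.cons_append]
        have hnt : pvNeg cs 0 = true := by
          rw [← hneg, hrcons]
          simp [pvNeg]
        have hrne : r ≠ [] := by rw [hrcons]; simp
        simp [hne, hbeq, hrne, hnt]
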